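-- pv_equiv track=rewrite | github.com/ayoubzulfiqar/Leetcode-Medium | SynonymousSentences/synonymous_sentences.py | areSentencesSynonymous
-- ===== SOURCE A (Python) =====
-- class DSU:
--     def __init__(self):
--         self.parent = {}
--         self.rank = {}
--
--     def find(self, i):
--         if i not in self.parent:
--             self.parent[i] = i
--             self.rank[i] = 0
--         if self.parent[i] == i:
--             return i
--         self.parent[i] = self.find(self.parent[i])
--         return self.parent[i]
--
--     def union(self, i, j):
--         root_i = self.find(i)
--         root_j = self.find(j)
--
--         if root_i != root_j:
--             if self.rank[root_i] < self.rank[root_j]: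
--                 self.parent[root_i] = root_j
--             elif self.rank[root_j] < self.rank[root_i]:
--                 self.parent[root_j] = root_i
--             else:
--                 self.parent[root_j] = root_i
--                 self.rank[root_i] += 1
--             return True
--         return False
--
-- def areSentencesSynonymous(sentence1: str, sentence2: str, synonyms: list[list[str]]) -> bool:
--     words1 = sentence1.split()
--     words2 = sentence2.split()
--
--     if len(words1) != len(words2):
--         return False
--
--     dsu = DSU()
--     for s1, s2 in synonyms:
--         dsu.union(s1, s2)
--
--     for i in range(len(words1)):
--         word1 = words1[i]
--         word2 = words2[i]
--
--         if word1 == word2: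
--             continue
--
--         root1 = dsu.find(word1)
--         root2 = dsu.find(word2)
--
--         if root1 != root2:
--             return False
--
--     return True
-- ===== SOURCE B (Python) =====
-- def areSentencesSynonymous(sentence1: str, sentence2: str, synonyms: list[list[str]]) -> bool:
--     words1 = sentence1.split()
--     words2 = sentence2.split()
--     if len(words1) != len(words2):
--         return False
--
--     # eager union: comp maps each seen word to an integer class id;
--     # merging relabels the whole smaller-side class in one pass
--     comp = {}
--     nid = 0
--     for a, b in synonyms:
--         if a not in comp:
--             comp[a] = nid
--             nid += 1
--         if b not in comp:
--             comp[b] = nid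
--             nid += 1
--         ia = comp[a]
--         ib = comp[b]
--         if ia != ib:
--             comp = {w: (ia if g == ib else g) for w, g in comp.items()}
--
--     return all(x == y or (x in comp and y in comp and comp[x] == comp[y])
--                for x, y in zip(words1, words2))
-- ===== Notes on version B (the rewrite author's own statement) =====
-- stated objective: alternative
-- what changed: Replaces A's union-find (parent/rank dicts, recursive find with path compression, union by rank) with a single flat word->class-id dict: new words get fresh integer ids and a union eagerly relabels the whole merged class in one pass, so the final check is a plain id comparison with no tree walking.
import Mathlib
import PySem

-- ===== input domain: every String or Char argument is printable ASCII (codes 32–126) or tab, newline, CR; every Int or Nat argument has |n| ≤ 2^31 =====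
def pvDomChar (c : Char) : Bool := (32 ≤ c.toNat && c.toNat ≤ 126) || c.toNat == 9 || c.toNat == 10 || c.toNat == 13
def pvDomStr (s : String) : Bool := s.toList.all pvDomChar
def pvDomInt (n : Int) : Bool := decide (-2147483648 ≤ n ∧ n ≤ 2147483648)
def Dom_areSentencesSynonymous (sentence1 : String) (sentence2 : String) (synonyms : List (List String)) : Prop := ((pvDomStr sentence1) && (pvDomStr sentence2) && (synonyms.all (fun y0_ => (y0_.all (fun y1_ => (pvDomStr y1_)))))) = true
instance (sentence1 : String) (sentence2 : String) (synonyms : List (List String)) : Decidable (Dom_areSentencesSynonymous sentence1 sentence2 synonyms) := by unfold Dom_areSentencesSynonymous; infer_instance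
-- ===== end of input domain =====

-- B replaces A's union-find (path compression + union by rank) with an eager-relabel
-- partition dict: a single integer class id per word, merged classes relabelled in one pass
-- (objective: alternative algorithm, not claimed faster).

-- ===== PORT A =====
structure DSUSt where
  parent : PySem.Dict String String
  rank : PySem.Dict String Int
deriving Repr, DecidableEq

-- DSU.find with path compression; the Nat fuel is only a totality guard (call sites pass
-- size+1, which the proofs show suffices); otherwise a step-for-step transliteration.
def dsuFind : Nat → DSUSt → String → DSUSt × String
  | 0, st, i => (st, i)
  | fuel+1, st, i =>
    let st1 := if st.parent.contains i then st else ⟨st.parent.insert i i, st.rank.insert i 0⟩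
    if st1.parent.getD i i = i then (st1, i)
    else
      let res := dsuFind fuel st1 (st1.parent.getD i i)
      (⟨res.1.parent.insert i res.2, res.1.rank⟩, res.2)

def dsuUnion (st : DSUSt) (i j : String) : DSUSt × Bool :=
  let f1 := dsuFind (st.parent.size + 1) st i
  let f2 := dsuFind (f1.1.parent.size + 1) f1.1 j
  let st2 := f2.1
  let ri := f1.2
  let rj := f2.2
  if ri ≠ rj then
    if st2.rank.getD ri 0 < st2.rank.getD rj 0 then
      (⟨st2.parent.insert ri rj, st2.rank⟩, true)
    else if st2.rank.getD rj 0 < st2.rank.getD ri 0 then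
      (⟨st2.parent.insert rj ri, st2.rank⟩, true)
    else
      (⟨st2.parent.insert rj ri, st2.rank.insert ri (st2.rank.getD ri 0 + 1)⟩, true)
  else (st2, false)

-- the `for i in range(...)` check loop with early return False
def dsuCheck : DSUSt → List String → List String → Bool
  | _, [], _ => true
  | _, _ :: _, [] => true
  | st, w1 :: ws1, w2 :: ws2 =>
    if w1 = w2 then dsuCheck st ws1 ws2
    else
      let f1 := dsuFind (st.parent.size + 1) st w1
      let f2 := dsuFind (f1.1.parent.size + 1) f1.1 w2
      if f1.2 ≠ f2.2 then false else dsuCheck f2.1 ws1 ws2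

-- one iteration of `for s1, s2 in synonyms: dsu.union(s1, s2)`
-- (rows that are not pairs raise ValueError in Python — excluded by Pre_; the port skips them)
def dsuRow (st : DSUSt) (row : List String) : DSUSt :=
  match row with
  | [] => st
  | [_] => st
  | [a, b] => (dsuUnion st a b).1
  | _ :: _ :: _ :: _ => st

def areSentencesSynonymous (sentence1 : String) (sentence2 : String) (synonyms : List (List String)) : Bool :=
  let words1 := PySem.Str.split₀ sentence1
  let words2 := PySem.Str.split₀ sentence2
  if words1.length ≠ words2.length then false
  else
    let st := synonyms.foldl dsuRow ⟨PySem.Dict.mk [], PySem.Dict.mk []⟩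
    dsuCheck st words1 words2

-- ===== PORT B =====
-- `if w not in comp: comp[w] = nid; nid += 1`
def bEnsure (comp : PySem.Dict String Int) (nid : Int) (w : String) : PySem.Dict String Int × Int :=
  if comp.contains w then (comp, nid) else (comp.insert w nid, nid + 1)

-- one synonyms row: ensure both words have a class id, then relabel b's whole class to a's
def bStep (acc : PySem.Dict String Int × Int) (row : List String) : PySem.Dict String Int × Int :=
  match row, acc with
  | [a, b], (comp, nid) =>
    let p1 := bEnsure comp nid a
    let p2 := bEnsure p1.1 p1.2 b
    let ia := p2.1.getD a 0
    let ib := p2.1.getD b 0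
    if ia ≠ ib then
      (PySem.Dict.mk (p2.1.items.map (fun p => (p.1, if p.2 = ib then ia else p.2))), p2.2)
    else p2
  | _, acc => acc

def areSentencesSynonymous_alt (sentence1 : String) (sentence2 : String) (synonyms : List (List String)) : Bool :=
  let words1 := PySem.Str.split₀ sentence1
  let words2 := PySem.Str.split₀ sentence2
  if words1.length ≠ words2.length then false
  else
    let comp := (synonyms.foldl bStep (PySem.Dict.mk [], 0)).1
    (words1.zip words2).all (fun p =>
      p.1 = p.2 || (comp.contains p.1 && comp.contains p.2 &&
        (comp.getD p.1 0 == comp.getD p.2 0)))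

-- ===== PRECONDITION & SPEC =====
-- Pre_ excludes exactly the inputs where Python A raises ValueError: a synonyms row that is
-- not a 2-element list, reached because the two sentences have the same word count
-- (with different word counts A returns False before touching synonyms). B raises there too.
def Pre_areSentencesSynonymous (sentence1 : String) (sentence2 : String) (synonyms : List (List String)) : Prop :=
  (PySem.Str.split₀ sentence1).length = (PySem.Str.split₀ sentence2).length →
    ∀ row ∈ synonyms, row.length = 2
instance (sentence1 : String) (sentence2 : String) (synonyms : List (List String)) : Decidable (Pre_areSentencesSynonymous sentence1 sentence2 synonyms) := by unfold Pre_areSentencesSynonymous; infer_instance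

def pvWitness_areSentencesSynonymous : String × String × List (List String) :=
  ("a b", "c d", [["a", "c"], ["b", "d"]])

def Spec_areSentencesSynonymous (sentence1 : String) (sentence2 : String) (synonyms : List (List String)) (out : Bool) : Prop := out = areSentencesSynonymous_alt sentence1 sentence2 synonyms
instance (sentence1 : String) (sentence2 : String) (synonyms : List (List String)) (out : Bool) : Decidable (Spec_areSentencesSynonymous sentence1 sentence2 synonyms out) := by unfold Spec_areSentencesSynonymous; infer_instance

-- ===== CLAIM (what is proved, stated in full; the proofs are below) =====
def Claim_equal_areSentencesSynonymous : Prop := ∀ (sentence1 : String) (sentence2 : String) (synonyms : List (List String)), Dom_areSentencesSynonymous sentence1 sentence2 synonyms → Pre_areSentencesSynonymous sentence1 sentence2 synonyms → Spec_areSentencesSynonymous sentence1 sentence2 synonyms (areSentencesSynonymous sentence1 sentence2 synonyms)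

-- ===== LEMMAS AND PROOFS =====

-- `Reaches p i r`: following parent pointers from i terminates at root r
inductive Reaches (p : PySem.Dict String String) : String → String → Prop
  | root {i : String} : (∀ q, p.get? i = some q → q = i) → Reaches p i i
  | step {i q r : String} : p.get? i = some q → q ≠ i → Reaches p q r → Reaches p i r

-- the parent map is a forest: some measure strictly decreases along non-trivial edges
def WfP (p : PySem.Dict String String) : Prop :=
  ∃ m : String → Nat, ∀ i q, p.get? i = some q → q ≠ i → m q < m i

-- parent values are themselves keys
def ClosedP (p : PySem.Dict String String) : Prop :=
  ∀ i q, p.get? i = some q → (p.get? q).isSome = true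

-- two words have a common root
def EqvR (p : PySem.Dict String String) (u v : String) : Prop :=
  ∃ r, Reaches p u r ∧ Reaches p v r

-- B's "same class" relation: same id if both present; absent words are singletons
def SameC (c : PySem.Dict String Int) (u v : String) : Prop :=
  (∃ g, c.get? u = some g ∧ c.get? v = some g) ∨ (c.get? u = none ∧ c.get? v = none ∧ u = v)

-- the simulation invariant carried through the synonyms fold
def SimInv (st : DSUSt) (c : PySem.Dict String Int) (nid : Int) : Prop :=
  WfP st.parent ∧ ClosedP st.parent ∧
  (∀ w, (st.parent.get? w).isSome ↔ (c.get? w).isSome) ∧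
  (∀ u v, EqvR st.parent u v ↔ SameC c u v) ∧
  (∀ w g, c.get? w = some g → g < nid)

theorem reaches_unique {p : PySem.Dict String String} {i r s : String}
    (h1 : Reaches p i r) (h2 : Reaches p i s) : r = s := by
  induction h1 generalizing s with
  | root hroot =>
    cases h2 with
    | root _ => rfl
    | step hq hne _ => exact absurd (hroot _ hq) hne
  | step hq hne _ ih =>
    cases h2 with
    | root hroot => exact absurd (hroot _ hq) hne
    | step hq' hne' htail =>
      cases hq.symm.trans hq' with
      | refl => exact ih htail

theorem reaches_isRoot {p : PySem.Dict String String} {i r : String}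
    (h : Reaches p i r) : ∀ q, p.get? r = some q → q = r := by
  induction h with
  | root hroot => exact hroot
  | step _ _ _ ih => exact ih

theorem reaches_m_le {p : PySem.Dict String String} {m : String → Nat}
    (hm : ∀ i q, p.get? i = some q → q ≠ i → m q < m i)
    {i r : String} (h : Reaches p i r) : m r ≤ m i := by
  induction h with
  | root _ => exact le_refl _
  | step hq hne _ ih => exact le_trans ih (le_of_lt (hm _ _ hq hne))

theorem root_key {p : PySem.Dict String String} (hcl : ClosedP p) {i r : String}
    (h : Reaches p i r) (hk : (p.get? i).isSome = true) : p.get? r = some r := by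
  induction h with
  | @root j hroot =>
    cases hv : p.get? j with
    | none => rw [hv] at hk; simp at hk
    | some v => exact congrArg some (hroot v hv)
  | step hq _ _ ih => exact ih (hcl _ _ hq)

theorem eqvR_iff_of_reaches {p : PySem.Dict String String} {u v ru rv : String}
    (hu : Reaches p u ru) (hv : Reaches p v rv) : (EqvR p u v ↔ ru = rv) := by
  constructor
  · rintro ⟨r, h1, h2⟩
    rw [reaches_unique hu h1, reaches_unique hv h2]
  · rintro rfl; exact ⟨ru, hu, hv⟩

-- T1: inserting a fresh self-loop changes no reachability
theorem reaches_insert_fresh {p : PySem.Dict String String} {i : String}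
    (hi : p.get? i = none) :
    (∀ j s, Reaches (p.insert i i) j s ↔ Reaches p j s) ∧
    (WfP p → WfP (p.insert i i)) ∧ (ClosedP p → ClosedP (p.insert i i)) := by
  have hg : ∀ w, (p.insert i i).get? w = if w = i then some i else p.get? w :=
    fun w => PySem.Dict.get?_insert p i w i
  refine ⟨?_, ?_, ?_⟩
  · intro j s
    constructor
    · intro h
      induction h with
      | @root j hroot =>
        refine Reaches.root ?_
        intro q hq
        by_cases hji : j = i
        · subst hji; rw [hi] at hq; cases hq
        · exact hroot q (by rw [hg j, if_neg hji]; exact hq)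
      | @step j q r hq hne _ ih =>
        by_cases hji : j = i
        · rw [hg j, if_pos hji] at hq
          cases hq
          exact absurd hji.symm hne
        · rw [hg j, if_neg hji] at hq
          exact Reaches.step hq hne ih
    · intro h
      induction h with
      | @root j hroot =>
        by_cases hji : j = i
        · refine Reaches.root ?_
          intro q hq
          rw [hg j, if_pos hji] at hq
          cases hq; exact hji.symm
        · refine Reaches.root ?_
          intro q hq
          rw [hg j, if_neg hji] at hq
          exact hroot q hq
      | @step j q r hq hne _ ih =>
        have hji : j ≠ i := by
          intro h; subst h; rw [hi] at hq; cases hq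
        exact Reaches.step (by rw [hg j, if_neg hji]; exact hq) hne ih
  · rintro ⟨m, hm⟩
    refine ⟨m, ?_⟩
    intro j q hq hne
    rw [hg j] at hq
    by_cases hji : j = i
    · rw [if_pos hji] at hq; cases hq; exact absurd hji.symm (by simpa using hne)
    · rw [if_neg hji] at hq; exact hm j q hq hne
  · intro hcl j q hq
    rw [hg j] at hq
    rw [hg q]
    by_cases hqi : q = i
    · simp [hqi]
    · rw [if_neg hqi]
      by_cases hji : j = i
      · rw [if_pos hji] at hq; cases hq; exact absurd rfl hqi
      · rw [if_neg hji] at hq; exact hcl j q hq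

-- T2: path compression (insert i ↦ its root) changes no reachability
theorem reaches_m_lt {p : PySem.Dict String String} {m : String → Nat}
    (hm : ∀ i q, p.get? i = some q → q ≠ i → m q < m i)
    {i r : String} (h : Reaches p i r) (hne : i ≠ r) : m r < m i := by
  cases h with
  | root _ => exact absurd rfl hne
  | step hq hqi tail => exact lt_of_le_of_lt (reaches_m_le hm tail) (hm _ _ hq hqi)

theorem reaches_insert_compress {p : PySem.Dict String String} {i r : String}
    (hwf : WfP p) (hir : Reaches p i r) (hne : i ≠ r) :
    (∀ j s, Reaches (p.insert i r) j s ↔ Reaches p j s) ∧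
    WfP (p.insert i r) ∧ (ClosedP p → ClosedP (p.insert i r)) := by
  have hg : ∀ w, (p.insert i r).get? w = if w = i then some r else p.get? w :=
    fun w => PySem.Dict.get?_insert p i w r
  have hrootr : ∀ q, p.get? r = some q → q = r := reaches_isRoot hir
  have hroot_p' : Reaches (p.insert i r) r r := by
    refine Reaches.root ?_
    intro q hq
    rw [hg r, if_neg (Ne.symm hne)] at hq
    exact hrootr q hq
  refine ⟨?_, ?_, ?_⟩
  · intro j s
    constructor
    · intro h
      induction h with
      | @root j hroot =>
        by_cases hji : j = i
        · have hrj : r = j := hroot r (by rw [hg j, if_pos hji])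
          exact absurd (hrj.trans hji) (Ne.symm hne)
        · refine Reaches.root ?_
          intro q hq
          exact hroot q (by rw [hg j, if_neg hji]; exact hq)
      | @step j q s hq hqj tail ih =>
        by_cases hji : j = i
        · rw [hg j, if_pos hji] at hq
          cases hq
          have hsr : s = r := reaches_unique ih (Reaches.root hrootr)
          rw [hji, hsr]
          exact hir
        · rw [hg j, if_neg hji] at hq
          exact Reaches.step hq hqj ih
    · intro h
      induction h with
      | @root j hroot =>
        by_cases hji : j = i
        · subst hji
          exact absurd (reaches_unique hir (Reaches.root hroot)) (Ne.symm hne)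
        · refine Reaches.root ?_
          intro q hq
          rw [hg j, if_neg hji] at hq
          exact hroot q hq
      | @step j q s hq hqj tail ih =>
        by_cases hji : j = i
        · have hjs : Reaches p i s := hji ▸ Reaches.step hq hqj tail
          have hsr : s = r := reaches_unique hjs hir
          rw [hji, hsr]
          exact Reaches.step (by rw [hg i, if_pos rfl]) (Ne.symm hne) hroot_p'
        · exact Reaches.step (by rw [hg j, if_neg hji]; exact hq) hqj ih
  · obtain ⟨m, hm⟩ := hwf
    refine ⟨m, ?_⟩
    intro j q hq hqj
    rw [hg j] at hq
    by_cases hji : j = i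
    · rw [if_pos hji] at hq
      cases hq
      rw [hji]
      exact reaches_m_lt hm hir hne

    · rw [if_neg hji] at hq
      exact hm j q hq hqj
  · intro hcl j q hq
    have hkey_i : (p.get? i).isSome = true := by
      cases hir with
      | root _ => exact absurd rfl hne
      | step hq' _ _ => rw [hq']; rfl
    have hkey_r : p.get? r = some r := root_key hcl hir hkey_i
    rw [hg j] at hq
    rw [hg q]
    by_cases hqi : q = i
    · simp [hqi]
    · rw [if_neg hqi]
      by_cases hji : j = i
      · rw [if_pos hji] at hq
        cases hq
        rw [hkey_r]; rfl
      · rw [if_neg hji] at hq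
        exact hcl j q hq

-- T3: linking root rx under root ry merges exactly those two classes
theorem reaches_insert_link {p : PySem.Dict String String} {rx ry : String}
    (hwf : WfP p)
    (hx : p.get? rx = some rx) (hy : p.get? ry = some ry) (hne : rx ≠ ry) :
    (∀ j s, Reaches (p.insert rx ry) j s ↔
      ((Reaches p j rx ∧ s = ry) ∨ (¬ Reaches p j rx ∧ Reaches p j s))) ∧
    WfP (p.insert rx ry) ∧ (ClosedP p → ClosedP (p.insert rx ry)) := by
  classical
  have hg : ∀ w, (p.insert rx ry).get? w = if w = rx then some ry else p.get? w :=
    fun w => PySem.Dict.get?_insert p rx w ry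
  have hrootx : ∀ q, p.get? rx = some q → q = rx := by
    intro q hq; rw [hx] at hq; cases hq; rfl
  have hrooty : ∀ q, p.get? ry = some q → q = ry := by
    intro q hq; rw [hy] at hq; cases hq; rfl
  have hrxrx : Reaches p rx rx := Reaches.root hrootx
  have hryry : Reaches p ry ry := Reaches.root hrooty
  have hnyx : ¬ Reaches p ry rx := by
    intro h
    exact hne (reaches_unique hryry h).symm
  have hroot_y' : Reaches (p.insert rx ry) ry ry := by
    refine Reaches.root ?_
    intro q hq
    rw [hg ry, if_neg (Ne.symm hne)] at hq
    exact hrooty q hq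
  -- edge transfer: for a non-rx node with an edge, reaching rx goes through the edge
  have htrans : ∀ j q, j ≠ rx → p.get? j = some q → q ≠ j → (Reaches p j rx ↔ Reaches p q rx) := by
    intro j q hjx hq hqj
    constructor
    · intro h
      cases h with
      | root _ => exact absurd rfl hjx
      | step hq' hqj' tail =>
        rw [hq] at hq'; cases hq'; exact tail
    · intro h
      exact Reaches.step hq hqj h
  refine ⟨?_, ?_, ?_⟩
  · intro j s
    constructor
    · intro h
      induction h with
      | @root j hroot =>
        have hjx : j ≠ rx := by
          intro hji
          have h1 : ry = j := hroot ry (by rw [hg j, if_pos hji])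
          exact hne (by rw [← hji]; exact h1.symm)
        refine Or.inr ⟨?_, Reaches.root (fun q hq => hroot q (by rw [hg j, if_neg hjx]; exact hq))⟩
        intro hr
        have : ∀ q, p.get? j = some q → q = j := by
          intro q hq
          exact hroot q (by rw [hg j, if_neg hjx]; exact hq)
        exact hjx (reaches_unique (Reaches.root this) hr)
      | @step j q s hq hqj tail ih =>
        by_cases hjx : j = rx
        · rw [hg j, if_pos hjx] at hq
          cases hq
          rcases ih with ⟨hq_rx, rfl⟩ | ⟨_, hys⟩
          · exact absurd hq_rx hnyx
          · have : s = ry := reaches_unique hys hryry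
            exact Or.inl ⟨by rw [hjx]; exact hrxrx, this⟩
        · rw [hg j, if_neg hjx] at hq
          rcases ih with ⟨hq_rx, rfl⟩ | ⟨hnq, hqs⟩
          · exact Or.inl ⟨Reaches.step hq hqj hq_rx, rfl⟩
          · exact Or.inr ⟨fun h => hnq ((htrans j q hjx hq hqj).mp h), Reaches.step hq hqj hqs⟩
    · have aux1 : ∀ j s, Reaches p j s → s = rx → Reaches (p.insert rx ry) j ry := by
        intro j s h
        induction h with
        | @root j hroot =>
          intro hs
          rw [hs]
          exact Reaches.step (by rw [hg rx, if_pos rfl]) (Ne.symm hne) hroot_y'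
        | @step j q s hq hqj tail ih =>
          intro hs
          have hjx : j ≠ rx := by
            intro hji
            rw [hji] at hq
            have : q = rx := hrootx q hq
            exact hqj (this.trans hji.symm)
          exact Reaches.step (by rw [hg j, if_neg hjx]; exact hq) hqj (ih hs)
      have aux2 : ∀ j s, Reaches p j s → ¬ Reaches p j rx → Reaches (p.insert rx ry) j s := by
        intro j s h
        induction h with
        | @root j hroot =>
          intro hn
          have hjx : j ≠ rx := fun hji => hn (by rw [hji]; exact hrxrx)
          exact Reaches.root (fun q hq => hroot q (by rw [hg j, if_neg hjx] at hq; exact hq))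
        | @step j q s hq hqj tail ih =>
          intro hn
          have hjx : j ≠ rx := fun hji => hn (by rw [hji]; exact hrxrx)
          have hnq : ¬ Reaches p q rx := fun h => hn (Reaches.step hq hqj h)
          exact Reaches.step (by rw [hg j, if_neg hjx]; exact hq) hqj (ih hnq)
      rintro (⟨hjrx, rfl⟩ | ⟨hn, hjs⟩)
      · exact aux1 j rx hjrx rfl
      · exact aux2 j s hjs hn
  · obtain ⟨m, hm⟩ := hwf
    refine ⟨fun u => if Reaches p u rx then m u + m ry + 1 else m u, ?_⟩
    intro j q hq hqj
    beta_reduce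
    rw [hg j] at hq
    by_cases hjx : j = rx
    · rw [if_pos hjx] at hq
      cases hq
      rw [hjx]
      rw [if_pos hrxrx, if_neg hnyx]
      omega
    · rw [if_neg hjx] at hq
      have hiff := htrans j q hjx hq hqj
      by_cases hj : Reaches p j rx
      · rw [if_pos hj, if_pos (hiff.mp hj)]
        have := hm j q hq hqj
        omega
      · rw [if_neg hj, if_neg (fun h => hj (hiff.mpr h))]
        exact hm j q hq hqj
  · intro hcl j q hq
    rw [hg j] at hq
    rw [hg q]
    by_cases hqx : q = rx
    · simp [hqx]
    · rw [if_neg hqx]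
      by_cases hjx : j = rx
      · rw [if_pos hjx] at hq
        cases hq
        rw [hy]; rfl
      · rw [if_neg hjx] at hq
        exact hcl j q hq

theorem eqvR_congr {p p' : PySem.Dict String String}
    (h : ∀ j s, Reaches p' j s ↔ Reaches p j s) : ∀ u v, EqvR p' u v ↔ EqvR p u v := by
  intro u v
  exact exists_congr (fun r => and_congr (h u r) (h v r))

theorem reaches_iff_eqvR {p : PySem.Dict String String} {a ra : String}
    (ha : Reaches p a ra) : ∀ u, Reaches p u ra ↔ EqvR p u a := by
  intro u
  constructor
  · intro h; exact ⟨ra, h, ha⟩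
  · rintro ⟨r, h1, h2⟩
    rw [reaches_unique ha h2]
    exact h1

theorem eqvR_insert_link {p : PySem.Dict String String} {rx ry : String}
    (hwf : WfP p)
    (hx : p.get? rx = some rx) (hy : p.get? ry = some ry) (hne : rx ≠ ry) :
    ∀ u v, EqvR (p.insert rx ry) u v ↔
      (EqvR p u v ∨ (Reaches p u rx ∧ Reaches p v ry) ∨ (Reaches p u ry ∧ Reaches p v rx)) := by
  intro u v
  obtain ⟨hchar, _, _⟩ := reaches_insert_link hwf hx hy hne
  constructor
  · rintro ⟨r, hu, hv⟩
    rw [hchar] at hu hv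
    rcases hu with ⟨hux, rfl⟩ | ⟨hnu, hur⟩
    · rcases hv with ⟨hvx, _⟩ | ⟨hnv, hvr⟩
      · exact Or.inl ⟨rx, hux, hvx⟩
      · exact Or.inr (Or.inl ⟨hux, hvr⟩)
    · rcases hv with ⟨hvx, hr⟩ | ⟨hnv, hvr⟩
      · rw [hr] at hur
        exact Or.inr (Or.inr ⟨hur, hvx⟩)
      · exact Or.inl ⟨r, hur, hvr⟩
  · rintro (⟨r, hu, hv⟩ | ⟨hux, hvy⟩ | ⟨huy, hvx⟩)
    · by_cases hr : r = rx
      · subst hr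
        exact ⟨ry, (hchar u ry).mpr (Or.inl ⟨hu, rfl⟩), (hchar v ry).mpr (Or.inl ⟨hv, rfl⟩)⟩
      · refine ⟨r, (hchar u r).mpr (Or.inr ⟨?_, hu⟩), (hchar v r).mpr (Or.inr ⟨?_, hv⟩)⟩
        · intro h; exact hr (reaches_unique hu h)
        · intro h; exact hr (reaches_unique hv h)
    · refine ⟨ry, (hchar u ry).mpr (Or.inl ⟨hux, rfl⟩), (hchar v ry).mpr (Or.inr ⟨?_, hvy⟩)⟩
      intro h
      exact hne (reaches_unique h hvy)
    · refine ⟨ry, (hchar u ry).mpr (Or.inr ⟨?_, huy⟩), (hchar v ry).mpr (Or.inl ⟨hvx, rfl⟩)⟩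
      intro h
      exact hne (reaches_unique h huy)

theorem keys_card_lt_size_succ (d : PySem.Dict String String) :
    d.keys.toFinset.card < d.size + 1 := by
  have h1 := List.toFinset_card_le d.keys
  have h2 : d.keys.length = d.size := by
    simp [PySem.Dict.keys, PySem.Dict.size]
  omega

theorem mem_keys_iff_isSome (d : PySem.Dict String String) (w : String) :
    w ∈ d.keys ↔ (d.get? w).isSome = true := by
  rw [← PySem.Dict.contains_iff_mem_keys, PySem.Dict.contains_eq_isSome_get?]

theorem dsuFind_go (st : DSUSt) (m : String → Nat)
    (hm : ∀ i q, st.parent.get? i = some q → q ≠ i → m q < m i)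
    (hcl : ClosedP st.parent) :
    ∀ (fuel : Nat) (i : String), 0 < fuel →
      ((st.parent.get? i).isSome = true →
        (st.parent.keys.toFinset.filter (fun w => m w ≤ m i)).card < fuel) →
      Reaches st.parent i (dsuFind fuel st i).2 ∧
      WfP (dsuFind fuel st i).1.parent ∧ ClosedP (dsuFind fuel st i).1.parent ∧
      (∀ j s, Reaches (dsuFind fuel st i).1.parent j s ↔ Reaches st.parent j s) ∧
      (∀ w, ((dsuFind fuel st i).1.parent.get? w).isSome = true ↔
        ((st.parent.get? w).isSome = true ∨ w = i)) := by
  intro fuel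
  induction fuel with
  | zero => intro i h0 _; omega
  | succ n ih =>
    intro i _ hcard
    by_cases hc : st.parent.contains i = true
    · obtain ⟨q, hq⟩ : ∃ q, st.parent.get? i = some q := by
        rw [PySem.Dict.contains_eq_isSome_get?] at hc
        exact Option.isSome_iff_exists.mp hc
      have hgetD : st.parent.getD i i = q := by
        rw [PySem.Dict.getD_eq_get?_getD, hq]; rfl
      by_cases hqi : q = i
      · have hred : dsuFind (n+1) st i = (st, i) := by
          simp [dsuFind, hc, hgetD, hqi]
        rw [hred]
        refine ⟨Reaches.root (fun q' hq' => by rw [hq] at hq'; cases hq'; exact hqi),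
          ⟨m, hm⟩, hcl, fun _ _ => Iff.rfl, ?_⟩
        intro w
        constructor
        · exact Or.inl
        · rintro (h | rfl)
          · exact h
          · rw [hq]; rfl
      · have hkey_q : (st.parent.get? q).isSome = true := hcl i q hq
        have hi_some : (st.parent.get? i).isSome = true := by rw [hq]; rfl
        have hcard_i := hcard hi_some
        have hmq : m q < m i := hm i q hq hqi
        have hsub : (st.parent.keys.toFinset.filter (fun w => m w ≤ m q)) ⊂
            (st.parent.keys.toFinset.filter (fun w => m w ≤ m i)) := by
          rw [Finset.ssubset_def]
          constructor
          · intro w hw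
            simp only [Finset.mem_filter] at hw ⊢
            exact ⟨hw.1, le_trans hw.2 (le_of_lt hmq)⟩
          · intro hcontra
            have hi_mem : i ∈ st.parent.keys.toFinset.filter (fun w => m w ≤ m i) := by
              simp only [Finset.mem_filter, List.mem_toFinset]
              exact ⟨(mem_keys_iff_isSome _ _).mpr hi_some, le_refl _⟩
            have := hcontra hi_mem
            simp only [Finset.mem_filter] at this
            omega
        have hcard_q : (st.parent.keys.toFinset.filter (fun w => m w ≤ m q)).card < n := by
          have := Finset.card_lt_card hsub
          omega
        have h0n : 0 < n := by omega
        obtain ⟨h1, h2, h3, h4, h5⟩ := ih q h0n (fun _ => hcard_q)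
        have hred : dsuFind (n+1) st i =
            (⟨(dsuFind n st q).1.parent.insert i (dsuFind n st q).2, (dsuFind n st q).1.rank⟩,
             (dsuFind n st q).2) := by
          simp [dsuFind, hc, hgetD, hqi]
        have hri : Reaches st.parent i (dsuFind n st q).2 := Reaches.step hq hqi h1
        have hrne : i ≠ (dsuFind n st q).2 := by
          intro contra
          have hle := reaches_m_le hm h1
          rw [← contra] at hle
          omega
        have hir' : Reaches (dsuFind n st q).1.parent i (dsuFind n st q).2 := (h4 _ _).mpr hri
        obtain ⟨ciff, cwf, ccl⟩ := reaches_insert_compress h2 hir' hrne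
        rw [hred]
        refine ⟨hri, cwf, ccl h3, fun j s => (ciff j s).trans (h4 j s), ?_⟩
        intro w
        rw [PySem.Dict.get?_insert]
        by_cases hwi : w = i
        · simp [hwi, hi_some]
        · rw [if_neg hwi]
          rw [h5 w]
          constructor
          · rintro (h | rfl)
            · exact Or.inl h
            · exact Or.inl hkey_q
          · rintro (h | h)
            · exact Or.inl h
            · exact absurd h hwi
    · have hcf : st.parent.contains i = false := by
        cases h : st.parent.contains i
        · rfl
        · exact absurd h hc
      have hnone : st.parent.get? i = none := by
        cases h : st.parent.get? i with
        | none => rfl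
        | some v =>
          rw [PySem.Dict.contains_eq_isSome_get?, h] at hcf
          simp at hcf
      have hred : dsuFind (n+1) st i = (⟨st.parent.insert i i, st.rank.insert i 0⟩, i) := by
        simp [dsuFind, hcf, PySem.Dict.getD_insert_self]
      obtain ⟨hiff, hwf', hcl'⟩ := reaches_insert_fresh hnone
      rw [hred]
      refine ⟨Reaches.root (fun q hq => by rw [hnone] at hq; cases hq),
        hwf' ⟨m, hm⟩, hcl' hcl, hiff, ?_⟩
      intro w
      rw [PySem.Dict.get?_insert]
      by_cases hwi : w = i
      · simp [hwi]
      · simp [hwi]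

-- the find specification: returns the root, preserves reachability, adds only key i
theorem dsuFind_spec (fuel : Nat) (st : DSUSt) (i : String)
    (hwf : WfP st.parent) (hcl : ClosedP st.parent)
    (hfuel : st.parent.keys.toFinset.card < fuel) :
    Reaches st.parent i (dsuFind fuel st i).2 ∧
    WfP (dsuFind fuel st i).1.parent ∧ ClosedP (dsuFind fuel st i).1.parent ∧
    (∀ j s, Reaches (dsuFind fuel st i).1.parent j s ↔ Reaches st.parent j s) ∧
    (∀ w, ((dsuFind fuel st i).1.parent.get? w).isSome = true ↔
      ((st.parent.get? w).isSome = true ∨ w = i)) := by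
  obtain ⟨m, hm⟩ := hwf
  refine dsuFind_go st m hm hcl fuel i (by omega) (fun _ => ?_)
  exact lt_of_le_of_lt (Finset.card_filter_le _ _) hfuel

theorem dsuFind_root_key (fuel : Nat) (st : DSUSt) (i : String)
    (hwf : WfP st.parent) (hcl : ClosedP st.parent)
    (hfuel : st.parent.keys.toFinset.card < fuel) :
    (dsuFind fuel st i).1.parent.get? (dsuFind fuel st i).2 = some (dsuFind fuel st i).2 := by
  obtain ⟨h1, h2, h3, h4, h5⟩ := dsuFind_spec fuel st i hwf hcl hfuel
  have hir : Reaches (dsuFind fuel st i).1.parent i (dsuFind fuel st i).2 := (h4 _ _).mpr h1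
  have hkey : ((dsuFind fuel st i).1.parent.get? i).isSome = true := (h5 i).mpr (Or.inr rfl)
  exact root_key h3 hir hkey

set_option maxHeartbeats 2000000 in
theorem dsuUnion_spec (st : DSUSt) (a b : String)
    (hwf : WfP st.parent) (hcl : ClosedP st.parent) :
    WfP (dsuUnion st a b).1.parent ∧ ClosedP (dsuUnion st a b).1.parent ∧
    (∀ w, ((dsuUnion st a b).1.parent.get? w).isSome = true ↔
      ((st.parent.get? w).isSome = true ∨ w = a ∨ w = b)) ∧
    (∀ u v, EqvR (dsuUnion st a b).1.parent u v ↔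
      (EqvR st.parent u v ∨ (EqvR st.parent u a ∧ EqvR st.parent v b) ∨
        (EqvR st.parent u b ∧ EqvR st.parent v a))) := by
  have hsz1 := keys_card_lt_size_succ st.parent
  obtain ⟨ha1, ha2, ha3, ha4, ha5⟩ := dsuFind_spec (st.parent.size + 1) st a hwf hcl hsz1
  have hka := dsuFind_root_key (st.parent.size + 1) st a hwf hcl hsz1
  set f1 := dsuFind (st.parent.size + 1) st a with hf1
  have hsz2 := keys_card_lt_size_succ f1.1.parent
  obtain ⟨hb1, hb2, hb3, hb4, hb5⟩ := dsuFind_spec (f1.1.parent.size + 1) f1.1 b ha2 ha3 hsz2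
  have hkb := dsuFind_root_key (f1.1.parent.size + 1) f1.1 b ha2 ha3 hsz2
  set f2 := dsuFind (f1.1.parent.size + 1) f1.1 b with hf2
  have hraa : Reaches st.parent a f1.2 := ha1
  have hrbb : Reaches st.parent b f2.2 := (ha4 _ _).mp hb1
  have heq12 : ∀ u v, EqvR f2.1.parent u v ↔ EqvR st.parent u v := by
    intro u v
    exact (eqvR_congr hb4 u v).trans (eqvR_congr ha4 u v)
  have hr12 : ∀ j s, Reaches f2.1.parent j s ↔ Reaches st.parent j s := by
    intro j s; exact (hb4 j s).trans (ha4 j s)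
  have hkeys2 : ∀ w, (f2.1.parent.get? w).isSome = true ↔
      ((st.parent.get? w).isSome = true ∨ w = a ∨ w = b) := by
    intro w
    rw [hb5 w, ha5 w]
    exact or_assoc
  have hkra2 : f2.1.parent.get? f1.2 = some f1.2 := by
    have hsome : (f2.1.parent.get? f1.2).isSome = true := by
      rw [hb5]
      exact Or.inl (by rw [hka]; rfl)
    have hroot : ∀ q, f2.1.parent.get? f1.2 = some q → q = f1.2 :=
      reaches_isRoot ((hr12 _ _).mpr (Reaches.root (reaches_isRoot ha1)))
    obtain ⟨v, hv⟩ := Option.isSome_iff_exists.mp hsome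
    rw [hv, hroot v hv]
  have hkrb2 : f2.1.parent.get? f2.2 = some f2.2 := hkb
  have hEqa : ∀ u, Reaches st.parent u f1.2 ↔ EqvR st.parent u a := reaches_iff_eqvR hraa
  have hEqb : ∀ u, Reaches st.parent u f2.2 ↔ EqvR st.parent u b := reaches_iff_eqvR hrbb
  have hdef : dsuUnion st a b =
      (if f1.2 ≠ f2.2 then
        if f2.1.rank.getD f1.2 0 < f2.1.rank.getD f2.2 0 then
          (⟨f2.1.parent.insert f1.2 f2.2, f2.1.rank⟩, true)
        else if f2.1.rank.getD f2.2 0 < f2.1.rank.getD f1.2 0 then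
          (⟨f2.1.parent.insert f2.2 f1.2, f2.1.rank⟩, true)
        else
          (⟨f2.1.parent.insert f2.2 f1.2, f2.1.rank.insert f1.2 (f2.1.rank.getD f1.2 0 + 1)⟩, true)
      else (f2.1, false)) := rfl
  by_cases hab : f1.2 = f2.2
  · have hres : (dsuUnion st a b).1 = f2.1 := by
      rw [hdef, if_neg (by simp [hab])]
    rw [hres]
    refine ⟨hb2, hb3, hkeys2, ?_⟩
    intro u v
    rw [heq12]
    constructor
    · exact Or.inl
    · rintro (h | ⟨h1, h2⟩ | ⟨h1, h2⟩)
      · exact h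
      · exact ⟨f1.2, (hEqa u).mpr h1, by rw [hab]; exact (hEqb v).mpr h2⟩
      · exact ⟨f1.2, by rw [hab]; exact (hEqb u).mpr h1, (hEqa v).mpr h2⟩
  · have hmain : ∀ rx ry, ((rx = f1.2 ∧ ry = f2.2) ∨ (rx = f2.2 ∧ ry = f1.2)) →
        WfP (f2.1.parent.insert rx ry) ∧ ClosedP (f2.1.parent.insert rx ry) ∧
        (∀ w, ((f2.1.parent.insert rx ry).get? w).isSome = true ↔
          ((st.parent.get? w).isSome = true ∨ w = a ∨ w = b)) ∧
        (∀ u v, EqvR (f2.1.parent.insert rx ry) u v ↔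
          (EqvR st.parent u v ∨ (EqvR st.parent u a ∧ EqvR st.parent v b) ∨
            (EqvR st.parent u b ∧ EqvR st.parent v a))) := by
      rintro rx ry (⟨rfl, rfl⟩ | ⟨rfl, rfl⟩)
      · obtain ⟨char, lwf, lcl⟩ := reaches_insert_link hb2 hkra2 hkrb2 hab
        have eqv := eqvR_insert_link hb2 hkra2 hkrb2 hab
        refine ⟨lwf, lcl hb3, ?_, ?_⟩
        · intro w
          rw [PySem.Dict.get?_insert]
          by_cases hw : w = f1.2
          · simp only [if_pos hw, Option.isSome_some, true_iff]
            refine (hkeys2 w).mp ?_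
            rw [hw, hkra2]; rfl
          · rw [if_neg hw]; exact hkeys2 w
        · intro u v
          rw [eqv u v]
          simp only [heq12, hr12, hEqa, hEqb]
      · have hab' : f2.2 ≠ f1.2 := Ne.symm hab
        obtain ⟨char, lwf, lcl⟩ := reaches_insert_link hb2 hkrb2 hkra2 hab'
        have eqv := eqvR_insert_link hb2 hkrb2 hkra2 hab'
        refine ⟨lwf, lcl hb3, ?_, ?_⟩
        · intro w
          rw [PySem.Dict.get?_insert]
          by_cases hw : w = f2.2
          · simp only [if_pos hw, Option.isSome_some, true_iff]
            refine (hkeys2 w).mp ?_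
            rw [hw, hkrb2]; rfl
          · rw [if_neg hw]; exact hkeys2 w
        · intro u v
          rw [eqv u v]
          simp only [heq12, hr12, hEqa, hEqb]
          exact or_congr Iff.rfl or_comm
    have hparent : (dsuUnion st a b).1.parent = f2.1.parent.insert f1.2 f2.2 ∨
        (dsuUnion st a b).1.parent = f2.1.parent.insert f2.2 f1.2 := by
      rw [hdef, if_pos (by exact hab : f1.2 ≠ f2.2)]
      split_ifs with h1 h2
      · left; rfl
      · right; rfl
      · right; rfl
    rcases hparent with hp | hp
    · rw [hp]
      exact hmain f1.2 f2.2 (Or.inl ⟨rfl, rfl⟩)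
    · rw [hp]
      exact hmain f2.2 f1.2 (Or.inr ⟨rfl, rfl⟩)

-- B-side: looking up in the relabelled dict is mapping the old lookup
theorem get?_mk_map_items (f : Int → Int) (l : List (String × Int)) (w : String) :
    (PySem.Dict.mk (l.map (fun p => (p.1, f p.2)))).get? w = ((PySem.Dict.mk l).get? w).map f := by
  induction l with
  | nil => rfl
  | cons hd tl ih =>
    obtain ⟨k, v⟩ := hd
    simp only [List.map_cons]
    rw [PySem.Dict.get?_mk_cons, PySem.Dict.get?_mk_cons]
    by_cases hk : (k == w) = true
    · rw [if_pos hk, if_pos hk]; rfl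
    · rw [if_neg hk, if_neg hk]; exact ih

theorem sameC_symm {c : PySem.Dict String Int} {u v : String}
    (h : SameC c u v) : SameC c v u := by
  rcases h with ⟨g, h1, h2⟩ | ⟨h1, h2, h3⟩
  · exact Or.inl ⟨g, h2, h1⟩
  · exact Or.inr ⟨h2, h1, h3.symm⟩

theorem sameC_trans {c : PySem.Dict String Int} {u v w : String}
    (h1 : SameC c u v) (h2 : SameC c v w) : SameC c u w := by
  rcases h1 with ⟨g, ha, hb⟩ | ⟨ha, hb, hc⟩
  · rcases h2 with ⟨g', hd, he⟩ | ⟨hd, he, hf⟩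
    · rw [hb] at hd; cases hd; exact Or.inl ⟨g, ha, he⟩
    · rw [hb] at hd; cases hd
  · rcases h2 with ⟨g', hd, he⟩ | ⟨hd, he, hf⟩
    · rw [hb] at hd; cases hd
    · exact Or.inr ⟨ha, he, hc.trans hf⟩

theorem sameC_insert_fresh (c : PySem.Dict String Int) (a : String) (nid : Int)
    (ha : c.get? a = none) (hfresh : ∀ w g, c.get? w = some g → g < nid) :
    ∀ u v, SameC (c.insert a nid) u v ↔ SameC c u v := by
  intro u v
  have hg : ∀ w, (c.insert a nid).get? w = if w = a then some nid else c.get? w :=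
    fun w => PySem.Dict.get?_insert c a w nid
  by_cases hu : u = a <;> by_cases hv : v = a
  · unfold SameC
    rw [hu, hv, hg a, if_pos rfl, ha]
    simp
  · unfold SameC
    rw [hu, hg a, hg v, if_pos rfl, if_neg hv, ha]
    constructor
    · rintro (⟨g, hg1, hg2⟩ | ⟨h1, -, -⟩)
      · cases hg1
        exact absurd (hfresh v _ hg2) (lt_irrefl nid)
      · cases h1
    · rintro (⟨g, hg1, -⟩ | ⟨-, -, h3⟩)
      · cases hg1
      · exact absurd h3.symm hv
  · unfold SameC
    rw [hv, hg u, hg a, if_pos rfl, if_neg hu, ha]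
    constructor
    · rintro (⟨g, hg1, hg2⟩ | ⟨-, h2, -⟩)
      · cases hg2
        exact absurd (hfresh u _ hg1) (lt_irrefl nid)
      · cases h2
    · rintro (⟨g, -, hg2⟩ | ⟨-, -, h3⟩)
      · cases hg2
      · exact absurd h3 hu
  · unfold SameC
    rw [hg u, hg v, if_neg hu, if_neg hv]

theorem sameC_relabel (c : PySem.Dict String Int) (a b : String) (ia ib : Int)
    (hia : c.get? a = some ia) (hib : c.get? b = some ib) :
    ∀ u v, SameC (PySem.Dict.mk (c.items.map (fun p => (p.1, if p.2 = ib then ia else p.2)))) u v ↔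
      (SameC c u v ∨ (SameC c u a ∧ SameC c v b) ∨ (SameC c u b ∧ SameC c v a)) := by
  intro u v
  have hmap : ∀ w, (PySem.Dict.mk (c.items.map (fun p => (p.1, if p.2 = ib then ia else p.2)))).get? w
      = (c.get? w).map (fun g => if g = ib then ia else g) :=
    fun w => get?_mk_map_items (fun g => if g = ib then ia else g) c.items w
  unfold SameC
  rw [hmap u, hmap v]
  rw [hia, hib]
  cases hgu : c.get? u with
  | none =>
    cases hgv : c.get? v with
    | none => simp
    | some gv => simp
  | some gu =>
    cases hgv : c.get? v with
    | none => simp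
    | some gv =>
      simp only [Option.map_some, Option.some.injEq, reduceCtorEq, false_and, and_false,
        or_false, exists_eq_left']
      by_cases h1 : gu = ib <;> by_cases h2 : gv = ib <;> simp [h1, h2] <;> omega

theorem bEnsure_spec (c : PySem.Dict String Int) (nid : Int) (w : String)
    (hval : ∀ x g, c.get? x = some g → g < nid) :
    (∀ u v, SameC (bEnsure c nid w).1 u v ↔ SameC c u v) ∧
    (∀ x, (((bEnsure c nid w).1.get? x).isSome = true) ↔
      ((c.get? x).isSome = true ∨ x = w)) ∧
    (∀ x g, (bEnsure c nid w).1.get? x = some g → g < (bEnsure c nid w).2) := by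
  unfold bEnsure
  by_cases hw : c.contains w = true
  · rw [if_pos hw]
    refine ⟨fun u v => Iff.rfl, ?_, hval⟩
    intro x
    constructor
    · exact Or.inl
    · rintro (h | rfl)
      · exact h
      · rw [← PySem.Dict.contains_eq_isSome_get?]; exact hw
  · rw [if_neg hw]
    have hnone : c.get? w = none := by
      cases h : c.get? w with
      | none => rfl
      | some v =>
        rw [PySem.Dict.contains_eq_isSome_get?, h] at hw
        simp at hw
    refine ⟨sameC_insert_fresh c w nid hnone hval, ?_, ?_⟩
    · intro x
      rw [PySem.Dict.get?_insert]
      by_cases hx : x = w <;> simp [hx]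
    · intro x g hg
      rw [PySem.Dict.get?_insert] at hg
      by_cases hx : x = w
      · rw [if_pos hx] at hg; cases hg; omega
      · rw [if_neg hx] at hg; have := hval x g hg; omega

theorem bStep_spec (st : DSUSt) (c : PySem.Dict String Int) (nid : Int) (a b : String)
    (hinv : SimInv st c nid) :
    SimInv (dsuUnion st a b).1 (bStep (c, nid) [a, b]).1 (bStep (c, nid) [a, b]).2 := by
  obtain ⟨hwf, hcl, hkeys, heqv, hval⟩ := hinv
  obtain ⟨hA_wf, hA_cl, hA_keys, hA_eqv⟩ := dsuUnion_spec st a b hwf hcl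
  obtain ⟨h1_same, h1_keys, h1_val⟩ := bEnsure_spec c nid a hval
  obtain ⟨h2_same, h2_keys, h2_val⟩ :=
    bEnsure_spec (bEnsure c nid a).1 (bEnsure c nid a).2 b h1_val
  set p1 := bEnsure c nid a with hp1
  set p2 := bEnsure p1.1 p1.2 b with hp2
  have hsame : ∀ u v, SameC p2.1 u v ↔ SameC c u v := fun u v => (h2_same u v).trans (h1_same u v)
  have hkeys2 : ∀ x, ((p2.1.get? x).isSome = true) ↔
      ((c.get? x).isSome = true ∨ x = a ∨ x = b) := by
    intro x
    rw [h2_keys x, h1_keys x]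
    exact or_assoc
  have hA_some : (p2.1.get? a).isSome = true := (hkeys2 a).mpr (Or.inr (Or.inl rfl))
  have hB_some : (p2.1.get? b).isSome = true := (hkeys2 b).mpr (Or.inr (Or.inr rfl))
  obtain ⟨ga, hga⟩ := Option.isSome_iff_exists.mp hA_some
  obtain ⟨gb, hgb⟩ := Option.isSome_iff_exists.mp hB_some
  have hgda : p2.1.getD a 0 = ga := by rw [PySem.Dict.getD_eq_get?_getD, hga]; rfl
  have hgdb : p2.1.getD b 0 = gb := by rw [PySem.Dict.getD_eq_get?_getD, hgb]; rfl
  have hdef : bStep (c, nid) [a, b] =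
      (if p2.1.getD a 0 ≠ p2.1.getD b 0 then
        (PySem.Dict.mk (p2.1.items.map
          (fun p => (p.1, if p.2 = p2.1.getD b 0 then p2.1.getD a 0 else p.2))), p2.2)
      else p2) := rfl
  have hgoal_same : ∀ u v, SameC (bStep (c, nid) [a, b]).1 u v ↔
      (SameC c u v ∨ (SameC c u a ∧ SameC c v b) ∨ (SameC c u b ∧ SameC c v a)) := by
    intro u v
    by_cases hne : p2.1.getD a 0 ≠ p2.1.getD b 0
    · rw [hdef, if_pos hne]
      rw [hgda, hgdb]
      rw [sameC_relabel p2.1 a b ga gb hga hgb u v]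
      rw [hsame u v, hsame u a, hsame v b, hsame u b, hsame v a]
    · rw [hdef, if_neg hne]
      rw [not_ne_iff] at hne
      rw [hgda, hgdb] at hne
      have hab : SameC p2.1 a b := Or.inl ⟨ga, hga, by rw [hgb, hne]⟩
      have hab_c : SameC c a b := (hsame a b).mp hab
      constructor
      · intro h
        exact Or.inl ((hsame u v).mp h)
      · rintro (h | ⟨h1, h2⟩ | ⟨h1, h2⟩)
        · exact (hsame u v).mpr h
        · exact (hsame u v).mpr (sameC_trans (sameC_trans h1 hab_c) (sameC_symm h2))
        · exact (hsame u v).mpr (sameC_trans (sameC_trans h1 (sameC_symm hab_c)) (sameC_symm h2))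
  have hgoal_keys : ∀ x, (((bStep (c, nid) [a, b]).1.get? x).isSome = true) ↔
      ((c.get? x).isSome = true ∨ x = a ∨ x = b) := by
    intro x
    by_cases hne : p2.1.getD a 0 ≠ p2.1.getD b 0
    · rw [hdef, if_pos hne]
      rw [get?_mk_map_items (fun g => if g = p2.1.getD b 0 then p2.1.getD a 0 else g) p2.1.items x]
      rw [Option.isSome_map]
      exact hkeys2 x
    · rw [hdef, if_neg hne]
      exact hkeys2 x
  have hgoal_val : ∀ x g, (bStep (c, nid) [a, b]).1.get? x = some g →
      g < (bStep (c, nid) [a, b]).2 := by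
    intro x g hg
    by_cases hne : p2.1.getD a 0 ≠ p2.1.getD b 0
    · rw [hdef, if_pos hne] at hg ⊢
      rw [get?_mk_map_items (fun g => if g = p2.1.getD b 0 then p2.1.getD a 0 else g) p2.1.items x] at hg
      cases hx : p2.1.get? x with
      | none => rw [hx] at hg; cases hg
      | some gx =>
        rw [hx] at hg
        simp only [Option.map_some, Option.some.injEq] at hg
        have hgx := h2_val x gx hx
        have hialt := h2_val a ga hga
        by_cases hgb' : gx = p2.1.getD b 0
        · rw [if_pos hgb', hgda] at hg
          omega
        · rw [if_neg hgb'] at hg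
          omega
    · rw [hdef, if_neg hne] at hg ⊢
      exact h2_val x g hg
  refine ⟨hA_wf, hA_cl, ?_, ?_, hgoal_val⟩
  · intro w
    rw [hA_keys w, hgoal_keys w, hkeys w]
  · intro u v
    rw [hA_eqv u v, hgoal_same u v, heqv u v, heqv u a, heqv v b, heqv u b, heqv v a]

theorem fold_inv (synonyms : List (List String)) (st : DSUSt) (c : PySem.Dict String Int) (nid : Int)
    (hinv : SimInv st c nid) :
    SimInv (synonyms.foldl dsuRow st)
        (synonyms.foldl bStep (c, nid)).1 (synonyms.foldl bStep (c, nid)).2 := by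
  induction synonyms generalizing st c nid with
  | nil => exact hinv
  | cons row tl ih =>
    rcases row with _ | ⟨a, _ | ⟨b, _ | ⟨x3, rest⟩⟩⟩
    · exact ih st c nid hinv
    · exact ih st c nid hinv
    · exact ih (dsuUnion st a b).1 (bStep (c, nid) [a, b]).1 (bStep (c, nid) [a, b]).2
        (bStep_spec st c nid a b hinv)
    · exact ih st c nid hinv

theorem dsuCheck_eq (ws1 ws2 : List String) (st : DSUSt) (c : PySem.Dict String Int)
    (hwf : WfP st.parent) (hcl : ClosedP st.parent)
    (heq : ∀ u v, EqvR st.parent u v ↔ SameC c u v) :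
    dsuCheck st ws1 ws2 = (ws1.zip ws2).all (fun p =>
      p.1 = p.2 || (c.contains p.1 && c.contains p.2 && (c.getD p.1 0 == c.getD p.2 0))) := by
  induction ws1 generalizing ws2 st with
  | nil => rfl
  | cons x t1 ih =>
    cases ws2 with
    | nil => rfl
    | cons y t2 =>
      have hsz1 := keys_card_lt_size_succ st.parent
      obtain ⟨ha1, ha2, ha3, ha4, ha5⟩ := dsuFind_spec (st.parent.size + 1) st x hwf hcl hsz1
      set f1 := dsuFind (st.parent.size + 1) st x with hf1
      have hsz2 := keys_card_lt_size_succ f1.1.parent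
      obtain ⟨hb1, hb2, hb3, hb4, hb5⟩ := dsuFind_spec (f1.1.parent.size + 1) f1.1 y ha2 ha3 hsz2
      set f2 := dsuFind (f1.1.parent.size + 1) f1.1 y with hf2
      have hry : Reaches st.parent y f2.2 := (ha4 _ _).mp hb1
      have heq2 : ∀ u v, EqvR f2.1.parent u v ↔ SameC c u v := by
        intro u v
        rw [eqvR_congr hb4, eqvR_congr ha4]
        exact heq u v
      have hiff : f1.2 = f2.2 ↔ SameC c x y := by
        rw [← heq x y]
        exact (eqvR_iff_of_reaches ha1 hry).symm
      have hdefC : dsuCheck st (x :: t1) (y :: t2) =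
          (if x = y then dsuCheck st t1 t2
           else if f1.2 ≠ f2.2 then false else dsuCheck f2.1 t1 t2) := rfl
      rw [hdefC, List.zip_cons_cons, List.all_cons]
      by_cases hxy : x = y
      · rw [if_pos hxy, ih t2 st hwf hcl heq]
        simp [hxy]
      · rw [if_neg hxy]
        have hbool : ((c.contains x && c.contains y) && (c.getD x 0 == c.getD y 0)) = true ↔
            SameC c x y := by
          rw [PySem.Dict.contains_eq_isSome_get?, PySem.Dict.contains_eq_isSome_get?,
              PySem.Dict.getD_eq_get?_getD, PySem.Dict.getD_eq_get?_getD]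
          unfold SameC
          cases hgx : c.get? x with
          | none =>
            cases hgy : c.get? y with
            | none => simp [hxy]
            | some gy => simp
          | some gx =>
            cases hgy : c.get? y with
            | none => simp
            | some gy => simp; omega
        by_cases hr : f1.2 = f2.2
        · rw [if_neg (not_not_intro hr), ih t2 f2.1 hb2 hb3 heq2]
          have hb : ((c.contains x && c.contains y) && (c.getD x 0 == c.getD y 0)) = true :=
            hbool.mpr (hiff.mp hr)
          rw [hb]
          simp
        · rw [if_pos hr]
          have hb : ((c.contains x && c.contains y) && (c.getD x 0 == c.getD y 0)) = false := by
            cases h : ((c.contains x && c.contains y) && (c.getD x 0 == c.getD y 0))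
            · rfl
            · exact absurd (hiff.mpr (hbool.mp h)) hr
          rw [hb]
          simp [hxy]

-- ===== VERDICT (by name: the statement is the Claim_ definition above) =====
theorem areSentencesSynonymous_spec : Claim_equal_areSentencesSynonymous := by
  unfold Claim_equal_areSentencesSynonymous
  intro s1 s2 syns _ _
  unfold Spec_areSentencesSynonymous
  simp only [areSentencesSynonymous, areSentencesSynonymous_alt]
  by_cases hlen : (PySem.Str.split₀ s1).length ≠ (PySem.Str.split₀ s2).length
  · rw [if_pos hlen, if_pos hlen]
  · rw [if_neg hlen, if_neg hlen]
    have hnoneP : ∀ w, (PySem.Dict.mk ([] : List (String × String))).get? w = none :=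
      fun _ => rfl
    have hnoneC : ∀ w, (PySem.Dict.mk ([] : List (String × Int))).get? w = none :=
      fun _ => rfl
    have hbase : SimInv ⟨PySem.Dict.mk [], PySem.Dict.mk []⟩ (PySem.Dict.mk []) 0 := by
      refine ⟨⟨fun _ => 0, ?_⟩, ?_, ?_, ?_, ?_⟩
      · intro i q hq
        rw [hnoneP] at hq
        cases hq
      · intro i q hq
        rw [hnoneP] at hq
        cases hq
      · intro w
        rw [hnoneP, hnoneC]
        rfl
      · intro u v
        constructor
        · rintro ⟨r, h1, h2⟩
          have hu : r = u := by
            cases h1 with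
            | root _ => rfl
            | step hq _ _ => rw [hnoneP] at hq; cases hq
          have hv : r = v := by
            cases h2 with
            | root _ => rfl
            | step hq _ _ => rw [hnoneP] at hq; cases hq
          exact Or.inr ⟨hnoneC u, hnoneC v, hu ▸ hv⟩
        · rintro (⟨g, hg1, -⟩ | ⟨-, -, huv⟩)
          · rw [hnoneC] at hg1; cases hg1
          · exact ⟨u, Reaches.root (fun q hq => by rw [hnoneP] at hq; cases hq),
              huv ▸ Reaches.root (fun q hq => by rw [hnoneP] at hq; cases hq)⟩
      · intro w g hg
        rw [hnoneC] at hg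
        cases hg
    obtain ⟨hwf, hcl, _, heqv, _⟩ := fold_inv syns ⟨PySem.Dict.mk [], PySem.Dict.mk []⟩
      (PySem.Dict.mk []) 0 hbase
    exact dsuCheck_eq (PySem.Str.split₀ s1) (PySem.Str.split₀ s2) _ _ hwf hcl heqv
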